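-- pv_equiv track=rewrite | github.com/toshi1014/addr | src/encoding_tools.py | pubkeyhash2addr_bech32
-- ===== SOURCE A (Python) =====
-- CODE_STRINGS = {
--     2: b'01',
--     3: b' ,.',
--     10: b'0123456789',
--     16: b'0123456789abcdef',
--     32: b'abcdefghijklmnopqrstuvwxyz234567',
--     58: b'123456789ABCDEFGHJKLMNPQRSTUVWXYZabcdefghijkmnopqrstuvwxyz',
--     256: b''.join([bytes((csx,)) for csx in range(256)]),
--     'bech32': b'qpzry9x8gf2tvdw0s3jn54khce6mua7l'
-- }
--
-- def convertbits(data, frombits, tobits, pad=True):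
--     acc = 0
--     bits = 0
--     ret = []
--     maxv = (1 << tobits) - 1
--     max_acc = (1 << (frombits + tobits - 1)) - 1
--
--     for value in data:
--         if value < 0 or (value >> frombits):
--             return None
--         acc = ((acc << frombits) | value) & max_acc
--         bits += frombits
--         while bits >= tobits:
--             bits -= tobits
--             ret.append((acc >> bits) & maxv)
--
--     if pad:
--         if bits:
--             ret.append((acc << (tobits - bits)) & maxv)
--     elif bits >= frombits or ((acc << (tobits - bits)) & maxv):
--         return None
--     return ret
--
-- def _array_to_codestring(array, base):
--     codebase = CODE_STRINGS[base]
--     codestring = ""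
--     for i in array:
--         codestring += chr(codebase[i])
--     return codestring
--
-- def _bech32_polymod(values):
--     generator = [0x3b6a57b2, 0x26508e6d, 0x1ea119fa, 0x3d4233dd, 0x2a1462b3]
--     chk = 1
--     for value in values:
--         top = chk >> 25
--         chk = (chk & 0x1ffffff) << 5 ^ value
--         for i in range(5):
--             chk ^= generator[i] if ((top >> i) & 1) else 0
--     return chk
--
-- def pubkeyhash2addr_bech32(pubkeyhash, prefix='bc', witver=0, separator='1', checksum_xor=1):
--     pubkeyhash = list(pubkeyhash)
--     data = [witver] + convertbits(pubkeyhash, 8, 5)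
--
--     # Expand the HRP into values for checksum computation
--     hrp_expanded = [ord(x) >> 5 for x in prefix] + [0] + \
--         [ord(x) & 31 for x in prefix]
--     polymod = _bech32_polymod(
--         hrp_expanded + data + [0, 0, 0, 0, 0, 0]
--     ) ^ checksum_xor
--     checksum = [(polymod >> 5 * (5 - i)) & 31 for i in range(6)]
--
--     return prefix + separator + _array_to_codestring(data, 'bech32') + _array_to_codestring(checksum, 'bech32')
-- ===== SOURCE B (Python) =====
-- _CHARSET = "qpzry9x8gf2tvdw0s3jn54khce6mua7l"
-- _GEN = [0x3b6a57b2, 0x26508e6d, 0x1ea119fa, 0x3d4233dd, 0x2a1462b3]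
--
--
-- def _polymod(values):
--     chk = 1
--     for value in values:
--         top = chk >> 25
--         chk = ((chk & 0x1ffffff) << 5) ^ value
--         for i in range(5):
--             if (top >> i) & 1:
--                 chk ^= _GEN[i]
--     return chk
--
--
-- def pubkeyhash2addr_bech32(pubkeyhash, prefix='bc', witver=0, separator='1', checksum_xor=1):
--     pubkeyhash = list(pubkeyhash)
--     # Pack all bytes into one big integer (MSB first), then slice 5-bit groups
--     # from the high end, left-padding the leftover bits with zeros.
--     big = 0
--     for v in pubkeyhash:
--         big = big * 256 + v
--     total = 8 * len(pubkeyhash)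
--     pad = (-total) % 5
--     n = big << pad
--     ngroups = (total + pad) // 5
--     data = [witver] + [(n >> 5 * (ngroups - 1 - i)) & 31 for i in range(ngroups)]
--     hrp_expanded = [ord(x) >> 5 for x in prefix] + [0] + [ord(x) & 31 for x in prefix]
--     polymod = _polymod(hrp_expanded + data + [0, 0, 0, 0, 0, 0]) ^ checksum_xor
--     checksum = [(polymod >> 5 * (5 - i)) & 31 for i in range(6)]
--     return prefix + separator + "".join(_CHARSET[d] for d in data + checksum)
-- ===== Notes on version B (the rewrite author's own statement) =====
-- stated objective: alternative
-- what changed: The streaming convertbits accumulator/while loop is replaced by packing all bytes into one big integer and slicing each 5-bit group off the high end by a shift-and-mask formula (with an arithmetic left-pad for leftover bits), and the per-list character translation loop by a single join over the charset.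
import Mathlib
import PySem

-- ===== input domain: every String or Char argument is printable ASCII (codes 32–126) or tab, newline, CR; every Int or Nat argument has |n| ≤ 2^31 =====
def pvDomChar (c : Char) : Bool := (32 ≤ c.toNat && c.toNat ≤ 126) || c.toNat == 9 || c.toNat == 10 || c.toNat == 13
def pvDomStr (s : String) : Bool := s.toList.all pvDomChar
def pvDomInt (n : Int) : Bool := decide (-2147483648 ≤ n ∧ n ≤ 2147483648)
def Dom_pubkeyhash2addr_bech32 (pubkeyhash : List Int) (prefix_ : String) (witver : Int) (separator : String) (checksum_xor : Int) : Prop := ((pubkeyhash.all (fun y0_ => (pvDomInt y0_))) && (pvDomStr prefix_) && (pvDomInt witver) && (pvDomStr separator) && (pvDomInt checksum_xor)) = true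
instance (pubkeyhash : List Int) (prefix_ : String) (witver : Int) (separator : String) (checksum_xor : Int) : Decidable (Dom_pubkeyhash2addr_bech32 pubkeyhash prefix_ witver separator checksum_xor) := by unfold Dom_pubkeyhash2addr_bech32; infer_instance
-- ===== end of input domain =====

-- B replaces the streaming convertbits accumulator with one big packed integer sliced
-- into 5-bit groups from the high end (objective: alternative decomposition, same results).

-- ===== PORT A =====

-- chr(CODE_STRINGS['bech32'][i]) as a one-character string; none = IndexError (excluded by Pre_)
def bech32Ch (i : Int) : String :=
  ((PySem.Str.pyGet? "qpzry9x8gf2tvdw0s3jn54khce6mua7l" i).map String.singleton).getD ""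

-- the inner `while bits >= tobits` loop of convertbits; the `0 < tobits` conjunct only
-- makes the recursion total (convertbits is invoked with tobits = 5 in this module)
def convertbitsInner (tobits maxv : Int) (acc : Int) (bits : Int) (ret : List Int) : Int × List Int :=
  if h : tobits ≤ bits ∧ 0 < tobits then
    convertbitsInner tobits maxv acc (bits - tobits)
      (ret ++ [PySem.Int.band (acc >>> (bits - tobits).toNat) maxv])
  else (bits, ret)
termination_by bits.toNat
decreasing_by omega

-- the body of convertbits' `for value in data` loop (none = the early `return None`)
def cbLoop (frombits tobits maxv maxAcc : Int) (st : Option (Int × Int × List Int)) (value : Int) : Option (Int × Int × List Int) :=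
  match st with
  | none => none
  | some (acc, bits, ret) =>
    if value < 0 ∨ (value >>> frombits.toNat) ≠ 0 then none
    else
      let acc := PySem.Int.band (PySem.Int.bor (acc <<< frombits.toNat) value) maxAcc
      let bits := bits + frombits
      let br := convertbitsInner tobits maxv acc bits ret
      some (acc, br.1, br.2)

-- shift amounts via .toNat: exact for the nonnegative frombits/tobits this module uses (8 and 5)
def convertbits (data : List Int) (frombits tobits : Int) (pad : Bool) : Option (List Int) :=
  let maxv : Int := (1 <<< tobits.toNat) - 1
  let maxAcc : Int := (1 <<< (frombits + tobits - 1).toNat) - 1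
  match data.foldl (cbLoop frombits tobits maxv maxAcc) (some (0, 0, [])) with
  | none => none
  | some (acc, bits, ret) =>
    if pad then
      if bits ≠ 0 then some (ret ++ [PySem.Int.band (acc <<< (tobits - bits).toNat) maxv])
      else some ret
    else if frombits ≤ bits ∨ PySem.Int.band (acc <<< (tobits - bits).toNat) maxv ≠ 0 then none
    else some ret

-- _array_to_codestring(array, 'bech32') with the CODE_STRINGS lookup inlined
def arrayToCodestring (array : List Int) : String :=
  array.foldl (fun codestring i => codestring ++ bech32Ch i) ""

def bech32Polymod (values : List Int) : Int :=
  let generator : List Int := [0x3b6a57b2, 0x26508e6d, 0x1ea119fa, 0x3d4233dd, 0x2a1462b3]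
  values.foldl (fun chk value =>
    let top := chk >>> 25
    let chk := PySem.Int.bxor ((PySem.Int.band chk 0x1ffffff) <<< 5) value
    (PySem.List.pyRange 0 5).foldl (fun chk i =>
      PySem.Int.bxor chk (if PySem.Int.band (top >>> i.toNat) 1 ≠ 0 then PySem.List.pyGetD generator i 0 else 0)) chk) 1

def pubkeyhash2addr_bech32 (pubkeyhash : List Int) (prefix_ : String) (witver : Int) (separator : String) (checksum_xor : Int) : String :=
  match convertbits pubkeyhash 8 5 true with
  | none => ""   -- Python: `[witver] + None` raises TypeError here (excluded by Pre_)
  | some cb =>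
    let data := [witver] ++ cb
    let hrp_expanded := prefix_.toList.map (fun x => ((x.toNat : Int) >>> 5)) ++ [0] ++
      prefix_.toList.map (fun x => PySem.Int.band (x.toNat : Int) 31)
    let polymod := PySem.Int.bxor (bech32Polymod (hrp_expanded ++ data ++ [0, 0, 0, 0, 0, 0])) checksum_xor
    let checksum := (PySem.List.pyRange 0 6).map (fun i => PySem.Int.band (polymod >>> (5 * (5 - i)).toNat) 31)
    prefix_ ++ separator ++ arrayToCodestring data ++ arrayToCodestring checksum

-- ===== PORT B =====

def bech32Gen : List Int := [0x3b6a57b2, 0x26508e6d, 0x1ea119fa, 0x3d4233dd, 0x2a1462b3]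

def bech32PolymodAlt (values : List Int) : Int :=
  values.foldl (fun chk value =>
    let top := chk >>> 25
    let chk := PySem.Int.bxor ((PySem.Int.band chk 0x1ffffff) <<< 5) value
    (PySem.List.pyRange 0 5).foldl (fun chk i =>
      if PySem.Int.band (top >>> i.toNat) 1 ≠ 0 then PySem.Int.bxor chk (PySem.List.pyGetD bech32Gen i 0) else chk) chk) 1

def pubkeyhash2addr_bech32_alt (pubkeyhash : List Int) (prefix_ : String) (witver : Int) (separator : String) (checksum_xor : Int) : String :=
  let big := pubkeyhash.foldl (fun b v => b * 256 + v) 0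
  let total : Int := 8 * (pubkeyhash.length : Int)
  let pad := PySem.Int.mod (-total) 5
  let n := big <<< pad.toNat         -- pad = (-total) % 5 is nonnegative
  let ngroups := PySem.Int.floordiv (total + pad) 5
  let data := [witver] ++ (PySem.List.pyRange 0 ngroups).map
      (fun i => PySem.Int.band (n >>> (5 * (ngroups - 1 - i)).toNat) 31)
  let hrp_expanded := prefix_.toList.map (fun x => ((x.toNat : Int) >>> 5)) ++ [0] ++
    prefix_.toList.map (fun x => PySem.Int.band (x.toNat : Int) 31)
  let polymod := PySem.Int.bxor (bech32PolymodAlt (hrp_expanded ++ data ++ [0, 0, 0, 0, 0, 0])) checksum_xor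
  let checksum := (PySem.List.pyRange 0 6).map (fun i => PySem.Int.band (polymod >>> (5 * (5 - i)).toNat) 31)
  prefix_ ++ separator ++ PySem.Str.join "" ((data ++ checksum).map bech32Ch)

-- ===== PRECONDITION & SPEC =====

-- Pre_ is exactly where A returns: a byte outside [0,256) makes convertbits return None and
-- `[witver] + None` raise TypeError; witver outside [-32,32) raises IndexError in the charset lookup.
def Pre_pubkeyhash2addr_bech32 (pubkeyhash : List Int) (prefix_ : String) (witver : Int) (separator : String) (checksum_xor : Int) : Prop :=
  (∀ v ∈ pubkeyhash, 0 ≤ v ∧ v < 256) ∧ -32 ≤ witver ∧ witver < 32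

instance (pubkeyhash : List Int) (prefix_ : String) (witver : Int) (separator : String) (checksum_xor : Int) : Decidable (Pre_pubkeyhash2addr_bech32 pubkeyhash prefix_ witver separator checksum_xor) := by unfold Pre_pubkeyhash2addr_bech32; infer_instance

def pvWitness_pubkeyhash2addr_bech32 : List Int × String × Int × String × Int := ([117, 9, 255], "bc", 0, "1", 1)

def Spec_pubkeyhash2addr_bech32 (pubkeyhash : List Int) (prefix_ : String) (witver : Int) (separator : String) (checksum_xor : Int) (out : String) : Prop := out = pubkeyhash2addr_bech32_alt pubkeyhash prefix_ witver separator checksum_xor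
instance (pubkeyhash : List Int) (prefix_ : String) (witver : Int) (separator : String) (checksum_xor : Int) (out : String) : Decidable (Spec_pubkeyhash2addr_bech32 pubkeyhash prefix_ witver separator checksum_xor out) := by unfold Spec_pubkeyhash2addr_bech32; infer_instance

-- ===== CLAIM (what is proved, stated in full; the proofs are below) =====
def Claim_equal_pubkeyhash2addr_bech32 : Prop := ∀ (pubkeyhash : List Int) (prefix_ : String) (witver : Int) (separator : String) (checksum_xor : Int), Dom_pubkeyhash2addr_bech32 pubkeyhash prefix_ witver separator checksum_xor → Pre_pubkeyhash2addr_bech32 pubkeyhash prefix_ witver separator checksum_xor → Spec_pubkeyhash2addr_bech32 pubkeyhash prefix_ witver separator checksum_xor (pubkeyhash2addr_bech32 pubkeyhash prefix_ witver separator checksum_xor)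

-- ===== LEMMAS AND PROOFS =====

-- the packed big integer of a byte list, and the 5-bit groups of n read MSB-first
def natBig (xs : List Int) : Nat := xs.foldl (fun b v => b * 256 + v.toNat) 0

def natDigits (n G : Nat) : List Int :=
  (List.range G).map (fun i => ((n / 32 ^ (G - 1 - i) % 32 : Nat) : Int))

lemma band_shift_digit (a s : Nat) :
    PySem.Int.band ((a : Int) >>> s) 31 = ((a / 2 ^ s % 32 : Nat) : Int) := by
  rw [show ((a : Int) >>> s) = ((a >>> s : Nat) : Int) from Int.natCast_shiftRight a s,
    show (31 : Int) = ((31 : Nat) : Int) by norm_num, PySem.Int.band_natCast]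
  rw [Nat.shiftRight_eq_div_pow]
  congr 1
  simpa using Nat.and_two_pow_sub_one_eq_mod (a / 2 ^ s) 5

lemma band31 (m : Nat) : PySem.Int.band (m : Int) 31 = ((m % 32 : Nat) : Int) := by
  rw [show (31 : Int) = ((31 : Nat) : Int) by norm_num, PySem.Int.band_natCast]
  congr 1
  simpa using Nat.and_two_pow_sub_one_eq_mod m 5

lemma acc_update (a v : Nat) (hv : v < 256) :
    PySem.Int.band (PySem.Int.bor ((a : Int) <<< (8 : Nat)) (v : Int)) 4095 = (((a * 256 + v) % 4096 : Nat) : Int) := by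
  rw [show ((a : Int) <<< (8 : Nat)) = ((a <<< 8 : Nat) : Int) from Int.natCast_shiftLeft a 8,
    PySem.Int.bor_natCast,
    show (4095 : Int) = ((4095 : Nat) : Int) by norm_num, PySem.Int.band_natCast]
  congr 1
  rw [← Nat.shiftLeft_add_eq_or_of_lt (by simpa using hv : v < 2 ^ 8) a, Nat.shiftLeft_eq]
  have := Nat.and_two_pow_sub_one_eq_mod (a * 2 ^ 8 + v) 12
  norm_num at this ⊢
  omega

lemma modDigit (M s : Nat) (hs : s ≤ 7) : M % 4096 / 2 ^ s % 32 = M / 2 ^ s % 32 := by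
  have h32 : (2:Nat) ^ s * 32 = 2 ^ (s + 5) := by rw [pow_add]; norm_num
  have hdvd : (2:Nat) ^ s * 32 ∣ 4096 := by
    rw [h32]; have := Nat.pow_dvd_pow 2 (show s + 5 ≤ 12 by omega); simpa using this
  rw [← Nat.mod_mul_right_div_self, ← Nat.mod_mul_right_div_self, Nat.mod_mod_of_dvd M hdvd]

lemma natDigits_succ (n G : Nat) :
    natDigits n (G + 1) = natDigits (n / 32) G ++ [((n % 32 : Nat) : Int)] := by
  unfold natDigits
  rw [List.range_succ, List.map_append]
  congr 1
  · apply List.map_congr_left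
    intro i hi
    rw [List.mem_range] at hi
    have he : G + 1 - 1 - i = (G - 1 - i) + 1 := by omega
    rw [he, Nat.div_div_eq_div_mul, ← pow_succ']
  · simp

lemma div_pow_div (M s t : Nat) : M / 2 ^ s / 2 ^ t = M / 2 ^ (s + t) := by
  rw [Nat.div_div_eq_div_mul, pow_add]

lemma digits_step (N w k : Nat) (hw : w < 256) :
    natDigits ((N * 256 + w) / 2 ^ (8 * (k + 1) % 5)) (8 * (k + 1) / 5) =
      natDigits (N / 2 ^ (8 * k % 5)) (8 * k / 5) ++
        [(((N * 256 + w) / 2 ^ (8 * k % 5 + 3) % 32 : Nat) : Int)] ++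
        (if 2 ≤ 8 * k % 5 then [(((N * 256 + w) / 2 ^ (8 * k % 5 - 2) % 32 : Nat) : Int)] else []) := by
  set r := 8 * k % 5 with hr
  set g := 8 * k / 5 with hg
  set M := N * 256 + w with hM
  have hN : N = M / 2 ^ 8 := by rw [hM]; norm_num; omega
  have hNg : N / 2 ^ r = M / 2 ^ (r + 8) := by
    rw [hN, div_pow_div, Nat.add_comm]
  have e2 : M / 2 ^ (r + 3) / 32 = M / 2 ^ (r + 8) := by
    rw [show (32:Nat) = 2 ^ 5 by norm_num, div_pow_div]
  by_cases h2 : 2 ≤ r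
  · have hr' : 8 * (k + 1) % 5 = r - 2 := by omega
    have hg' : 8 * (k + 1) / 5 = g + 2 := by omega
    rw [hr', hg', if_pos h2, natDigits_succ, natDigits_succ]
    have e1 : M / 2 ^ (r - 2) / 32 = M / 2 ^ (r + 3) := by
      rw [show (32:Nat) = 2 ^ 5 by norm_num, div_pow_div,
        show r - 2 + 5 = r + 3 by omega]
    rw [e1, e2, ← hNg]
  · have hr' : 8 * (k + 1) % 5 = r + 3 := by omega
    have hg' : 8 * (k + 1) / 5 = g + 1 := by omega
    rw [hr', hg', if_neg h2, natDigits_succ, e2, ← hNg]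
    simp

lemma drain (a b : Nat) (hb : b < 5) (ret : List Int) :
    convertbitsInner 5 31 (a : Int) ((b : Int) + 8) ret =
      ((((b + 8) % 5 : Nat) : Int), ret ++ [((a / 2 ^ (b + 3) % 32 : Nat) : Int)] ++
        (if 2 ≤ b then [((a / 2 ^ (b - 2) % 32 : Nat) : Int)] else [])) := by
  interval_cases b
  · rw [show ((0:Nat):Int) + 8 = (8:Int) by norm_num]
    rw [convertbitsInner, dif_pos (by norm_num), convertbitsInner, dif_neg (by norm_num)]
    rw [show ((8:Int) - 5).toNat = 3 by decide, band_shift_digit]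
    norm_num
  · rw [show ((1:Nat):Int) + 8 = (9:Int) by norm_num]
    rw [convertbitsInner, dif_pos (by norm_num), convertbitsInner, dif_neg (by norm_num)]
    rw [show ((9:Int) - 5).toNat = 4 by decide, band_shift_digit]
    norm_num
  · rw [show ((2:Nat):Int) + 8 = (10:Int) by norm_num]
    rw [convertbitsInner, dif_pos (by norm_num), convertbitsInner, dif_pos (by norm_num),
      convertbitsInner, dif_neg (by norm_num)]
    rw [show ((10:Int) - 5).toNat = 5 by decide, show ((10:Int) - 5 - 5).toNat = 0 by decide,
      band_shift_digit, band_shift_digit]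
    norm_num
  · rw [show ((3:Nat):Int) + 8 = (11:Int) by norm_num]
    rw [convertbitsInner, dif_pos (by norm_num), convertbitsInner, dif_pos (by norm_num),
      convertbitsInner, dif_neg (by norm_num)]
    rw [show ((11:Int) - 5).toNat = 6 by decide, show ((11:Int) - 5 - 5).toNat = 1 by decide,
      band_shift_digit, band_shift_digit]
    norm_num
  · rw [show ((4:Nat):Int) + 8 = (12:Int) by norm_num]
    rw [convertbitsInner, dif_pos (by norm_num), convertbitsInner, dif_pos (by norm_num),
      convertbitsInner, dif_neg (by norm_num)]
    rw [show ((12:Int) - 5).toNat = 7 by decide, show ((12:Int) - 5 - 5).toNat = 2 by decide,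
      band_shift_digit, band_shift_digit]
    norm_num

lemma natBig_append (ys : List Int) (v : Int) :
    natBig (ys ++ [v]) = natBig ys * 256 + v.toNat := by
  simp [natBig, List.foldl_append]

lemma cb_foldl (xs : List Int) (h : ∀ v ∈ xs, 0 ≤ v ∧ v < 256) :
    xs.foldl (cbLoop 8 5 31 4095) (some (0, 0, [])) =
      some (((natBig xs % 4096 : Nat) : Int), ((8 * xs.length % 5 : Nat) : Int),
        natDigits (natBig xs / 2 ^ (8 * xs.length % 5)) (8 * xs.length / 5)) := by
  induction xs using List.reverseRecOn with
  | nil => simp [natBig, natDigits]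
  | append_singleton ys v ih =>
    have hv : 0 ≤ v ∧ v < 256 := h v (by simp)
    have hys : ∀ w ∈ ys, 0 ≤ w ∧ w < 256 := fun w hw => h w (by simp [hw])
    rw [List.foldl_append, ih hys, List.foldl_cons, List.foldl_nil]
    set k := ys.length with hk
    set N := natBig ys with hN
    have hvN : v = ((v.toNat : Nat) : Int) := (Int.toNat_of_nonneg hv.1).symm
    have hv256 : v.toNat < 256 := by omega
    have hguard : ¬(v < 0 ∨ (v >>> (8:Int).toNat) ≠ 0) := by
      push_neg
      refine ⟨by omega, ?_⟩
      rw [show (8:Int).toNat = 8 from rfl, hvN, ← Int.natCast_shiftRight,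
        Nat.shiftRight_eq_div_pow]
      norm_num
      omega
    simp only [cbLoop, hguard, if_false]
    rw [show (8:Int).toNat = 8 from rfl, hvN, acc_update _ _ hv256]
    have hb5 : 8 * k % 5 < 5 := by omega
    have hfst : ((N % 4096) * 256 + v.toNat) % 4096 = (N * 256 + v.toNat) % 4096 :=
      Nat.ModEq.add_right v.toNat ((Nat.mod_modEq N 4096).mul_right 256)
    rw [hfst, drain _ _ hb5]
    have hlen : (ys ++ [((v.toNat : Nat) : Int)]).length = k + 1 := by simp [hk]
    have hbig : natBig (ys ++ [((v.toNat : Nat) : Int)]) = N * 256 + v.toNat := by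
      rw [natBig_append, ← hN]
      simp
      omega
    rw [hlen, hbig]
    rw [modDigit _ _ (by omega), modDigit _ _ (by omega)]
    rw [show ((8 * k % 5 + 8) % 5 : Nat) = (8 * (k + 1) % 5 : Nat) by omega]
    rw [digits_step N v.toNat k hv256]

lemma mul_pow_div (N r : Nat) (hr : r < 5) :
    N * 2 ^ (5 - r) / 32 = N / 2 ^ r := by
  rw [show (32:Nat) = 2 ^ (5 - r) * 2 ^ r by
      rw [← pow_add, show 5 - r + r = 5 by omega]; norm_num]
  rw [← Nat.div_div_eq_div_mul, Nat.mul_div_cancel N (Nat.pow_pos (by norm_num))]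

lemma convertbits_eq (xs : List Int) (h : ∀ v ∈ xs, 0 ≤ v ∧ v < 256) (p G : Nat)
    (hp : p = (5 - 8 * xs.length % 5) % 5) (hG : G = (8 * xs.length + p) / 5) :
    convertbits xs 8 5 true = some (natDigits (natBig xs * 2 ^ p) G) := by
  simp only [convertbits]
  rw [show ((1 <<< (5:Int).toNat : Nat) : Int) - 1 = 31 by decide,
    show ((1 <<< ((8:Int) + 5 - 1).toNat : Nat) : Int) - 1 = 4095 by decide]
  rw [cb_foldl xs h]
  simp only []
  by_cases hr : 8 * xs.length % 5 = 0
  · have hp0 : p = 0 := by omega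
    have hG0 : G = 8 * xs.length / 5 := by omega
    simp [hr, hp0, hG0]
  · have hcast : ((8 * xs.length % 5 : Nat) : Int) ≠ 0 := by omega
    have hr5 : 8 * xs.length % 5 < 5 := by omega
    rw [if_pos trivial, if_pos hcast]
    have ht : ((5:Int) - ((8 * xs.length % 5 : Nat) : Int)).toNat = 5 - 8 * xs.length % 5 := by
      omega
    rw [ht, show (((natBig xs % 4096 : Nat) : Int) <<< (5 - 8 * xs.length % 5)) =
        (((natBig xs % 4096) <<< (5 - 8 * xs.length % 5) : Nat) : Int) from
      Int.natCast_shiftLeft _ _, band31, Nat.shiftLeft_eq]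
    have hmod : natBig xs % 4096 * 2 ^ (5 - 8 * xs.length % 5) % 32
        = natBig xs * 2 ^ (5 - 8 * xs.length % 5) % 32 :=
      Nat.ModEq.mul_right _ ((Nat.mod_modEq (natBig xs) 4096).of_dvd (by norm_num))
    rw [hmod]
    have hp5 : p = 5 - 8 * xs.length % 5 := by omega
    have hG1 : G = 8 * xs.length / 5 + 1 := by omega
    rw [hp5, hG1, natDigits_succ, mul_pow_div _ _ hr5]

lemma big_aux (xs : List Int) (h : ∀ v ∈ xs, 0 ≤ v) : ∀ (m : Nat),
    xs.foldl (fun b v => b * 256 + v) ((m : Nat) : Int) =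
      ((xs.foldl (fun b v => b * 256 + v.toNat) m : Nat) : Int) := by
  induction xs with
  | nil => intro m; simp
  | cons x xs ih =>
    intro m
    have hx : 0 ≤ x := h x (by simp)
    have hh : ∀ v ∈ xs, 0 ≤ v := fun v hv => h v (by simp [hv])
    simp only [List.foldl_cons]
    rw [show ((m : Nat) : Int) * 256 + x = (((m * 256 + x.toNat : Nat)) : Int) by push_cast; omega]
    exact ih hh _

lemma big_eq (xs : List Int) (h : ∀ v ∈ xs, 0 ≤ v ∧ v < 256) :
    xs.foldl (fun b v => b * 256 + v) (0 : Int) = ((natBig xs : Nat) : Int) := by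
  have := big_aux xs (fun v hv => (h v hv).1) 0
  simpa [natBig] using this

lemma polymod_eq (values : List Int) : bech32Polymod values = bech32PolymodAlt values := by
  simp only [bech32Polymod, bech32PolymodAlt]
  refine PySem.List.foldl_congr_mem _ _ _ _ ?_
  intro chk value _
  refine PySem.List.foldl_congr_mem _ _ _ _ ?_
  intro c i _
  split_ifs with hc <;> simp [PySem.Int.bxor_zero, bech32Gen]

lemma joinNil (l : List (List Char)) : PySem.Chars.join [] l = l.flatten := by
  induction l with
  | nil => simp [PySem.Chars.join_nil]
  | cons p rest ih =>
    cases rest with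
    | nil => simp [PySem.Chars.join, List.intercalate]
    | cons q r => rw [PySem.Chars.join_cons_cons]; simp_all

lemma codestring_aux (xs : List Int) : ∀ (s : String),
    (xs.foldl (fun codestring i => codestring ++ bech32Ch i) s).toList =
      s.toList ++ (xs.map (fun i => (bech32Ch i).toList)).flatten := by
  induction xs with
  | nil => intro s; simp
  | cons x xs ih => intro s; simp [ih, String.toList_append]

lemma arrayToCodestring_toList (xs : List Int) :
    (arrayToCodestring xs).toList = (xs.map (fun i => (bech32Ch i).toList)).flatten := by
  simpa [arrayToCodestring] using codestring_aux xs ""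

-- ===== VERDICT (by name: the statement is the Claim_ definition above) =====
theorem pubkeyhash2addr_bech32_spec : Claim_equal_pubkeyhash2addr_bech32 := by
  intro pubkeyhash prefix_ witver separator checksum_xor _hdom hpre
  obtain ⟨hvals, _hwv⟩ := hpre
  unfold Spec_pubkeyhash2addr_bech32
  set k := pubkeyhash.length with hk
  set p := (5 - 8 * k % 5) % 5 with hp
  set G := (8 * k + p) / 5 with hG
  -- A side
  simp only [pubkeyhash2addr_bech32]
  rw [convertbits_eq pubkeyhash hvals p G hp hG]
  -- B side
  simp only [pubkeyhash2addr_bech32_alt]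
  rw [big_eq pubkeyhash hvals]
  have hpad : PySem.Int.mod (-(8 * (k : Int))) 5 = ((p : Nat) : Int) := by
    rw [PySem.Int.mod_eq_emod_of_pos (by norm_num)]
    omega
  rw [hpad]
  have hng : PySem.Int.floordiv (8 * (k : Int) + ((p : Nat) : Int)) 5 = ((G : Nat) : Int) := by
    rw [PySem.Int.floordiv_eq_ediv_of_pos (by norm_num)]
    omega
  rw [hng]
  have hmap : (PySem.List.pyRange 0 ((G : Nat) : Int)).map
      (fun i => PySem.Int.band ((((natBig pubkeyhash : Nat) : Int) <<< ((p : Nat) : Int).toNat) >>> (5 * (((G : Nat) : Int) - 1 - i)).toNat) 31)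
      = natDigits (natBig pubkeyhash * 2 ^ p) G := by
    rw [PySem.List.pyRange_zero_nat, List.map_map]
    unfold natDigits
    apply List.map_congr_left
    intro j hj
    rw [List.mem_range] at hj
    simp only [Function.comp]
    rw [show (((p : Nat) : Int)).toNat = p from Int.toNat_natCast p,
      show (((natBig pubkeyhash : Nat) : Int) <<< p) = (((natBig pubkeyhash <<< p : Nat)) : Int) from Int.natCast_shiftLeft _ _,
      show ((5 * (((G : Nat) : Int) - 1 - (j : Int))).toNat) = 5 * (G - 1 - j) by omega,
      band_shift_digit, Nat.shiftLeft_eq]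
    congr 2
    rw [pow_mul]
    norm_num
  rw [hmap, polymod_eq]
  -- both sides are prefix_ ++ separator ++ <the same digit lists rendered to characters>
  apply String.toList_inj.mp
  simp [String.toList_append, arrayToCodestring_toList, PySem.Str.toList_join, joinNil,
    List.map_append, List.flatten_append, Function.comp_def]
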